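-- pv_equiv track=rewrite | github.com/Entrevistas989/sistema-pukaray-ia | app.py | resumen_personas
-- ===== SOURCE A (Python) =====
-- def resumen_personas(registros, nombre_key, cargo_key, depto_key=None, apoyo_key=None):
--     nombres, cargos, deptos, apoyos = [], [], [], []
--     for r in registros:
--         if r.get(nombre_key):
--             nombres.append(str(r.get(nombre_key, "") or ""))
--         if r.get(cargo_key):
--             cargos.append(str(r.get(cargo_key, "") or ""))
--         if depto_key and r.get(depto_key):
--             deptos.append(str(r.get(depto_key, "") or ""))
--         if apoyo_key and r.get(apoyo_key):
--             apoyos.append(str(r.get(apoyo_key, "") or ""))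
--
--     return {
--         "nombres": ", ".join(nombres),
--         "cargos": ", ".join(cargos),
--         "deptos": ", ".join(deptos),
--         "apoyos": "\n".join(apoyos),
--     }
-- ===== SOURCE B (Python) =====
-- def resumen_personas(registros, nombre_key, cargo_key, depto_key=None, apoyo_key=None):
--     def joined(key, sep):
--         return sep.join(str(v) for r in registros for v in (r.get(key),) if v)
--     return {
--         "nombres": joined(nombre_key, ", "),
--         "cargos": joined(cargo_key, ", "),
--         "deptos": joined(depto_key, ", ") if depto_key else "",
--         "apoyos": joined(apoyo_key, "\n") if apoyo_key else "",
--     }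
-- ===== Notes on version B (the rewrite author's own statement) =====
-- stated objective: simpler
-- what changed: Replaces A's single loop maintaining four accumulator lists with one small helper that scans registros per field, called four times to assemble the result dict directly.
import Mathlib
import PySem

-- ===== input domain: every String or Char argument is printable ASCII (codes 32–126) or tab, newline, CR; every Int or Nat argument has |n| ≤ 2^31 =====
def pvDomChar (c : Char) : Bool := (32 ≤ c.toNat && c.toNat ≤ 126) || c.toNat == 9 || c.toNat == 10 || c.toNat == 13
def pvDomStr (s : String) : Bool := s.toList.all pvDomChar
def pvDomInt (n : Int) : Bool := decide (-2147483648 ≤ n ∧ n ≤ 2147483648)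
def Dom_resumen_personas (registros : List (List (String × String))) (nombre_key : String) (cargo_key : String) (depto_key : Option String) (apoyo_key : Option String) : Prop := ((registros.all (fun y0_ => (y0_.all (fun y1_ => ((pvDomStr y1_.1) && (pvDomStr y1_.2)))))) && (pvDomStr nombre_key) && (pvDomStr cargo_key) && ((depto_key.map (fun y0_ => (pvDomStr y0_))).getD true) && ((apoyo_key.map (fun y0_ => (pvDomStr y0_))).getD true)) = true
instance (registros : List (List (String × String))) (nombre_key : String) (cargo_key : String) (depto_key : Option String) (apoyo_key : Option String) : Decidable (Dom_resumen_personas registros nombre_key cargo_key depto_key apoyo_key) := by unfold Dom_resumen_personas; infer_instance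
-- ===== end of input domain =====

-- ===== PORT A =====
-- Port of A; this file changes the decomposition only: B scans registros once per field
-- via a shared helper instead of A's single loop with four accumulator lists ("simpler").
-- r.get(k): first-match lookup in the association list (PySem.Dict semantics)
def pvGetStr (r : List (String × String)) (k : String) : Option String :=
  (PySem.Dict.mk r).get? k

-- str(r.get(k, "") or "")
def pvAVal (r : List (String × String)) (k : String) : String :=
  let x := (pvGetStr r k).getD ""
  if x = "" then "" else x

-- one iteration of A's for-loop over registros, updating the four accumulator lists
def pvAStep (nk ck : String) (dk ak : Option String)
    (st : List String × List String × List String × List String)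
    (r : List (String × String)) :
    List String × List String × List String × List String :=
  let ns := if ((pvGetStr r nk).getD "") ≠ "" then st.1 ++ [pvAVal r nk] else st.1
  let cs := if ((pvGetStr r ck).getD "") ≠ "" then st.2.1 ++ [pvAVal r ck] else st.2.1
  let ds := match dk with
    | some k => if k ≠ "" ∧ ((pvGetStr r k).getD "") ≠ "" then st.2.2.1 ++ [pvAVal r k] else st.2.2.1
    | none => st.2.2.1
  let asv := match ak with
    | some k => if k ≠ "" ∧ ((pvGetStr r k).getD "") ≠ "" then st.2.2.2 ++ [pvAVal r k] else st.2.2.2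
    | none => st.2.2.2
  (ns, cs, ds, asv)

def resumen_personas (registros : List (List (String × String))) (nombre_key : String) (cargo_key : String) (depto_key : Option String) (apoyo_key : Option String) : List (String × String) :=
  let st := registros.foldl (pvAStep nombre_key cargo_key depto_key apoyo_key) ([], [], [], [])
  [("nombres", PySem.Str.join ", " st.1),
   ("cargos", PySem.Str.join ", " st.2.1),
   ("deptos", PySem.Str.join ", " st.2.2.1),
   ("apoyos", PySem.Str.join "\n" st.2.2.2)]

-- ===== PORT B =====
-- the truthy value of r.get(key), if any (the generator body 'for v in (r.get(key),) if v')
def pvBPick (k : String) (r : List (String × String)) : Option String :=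
  match pvGetStr r k with
  | some v => if v ≠ "" then some v else none
  | none => none

-- joined(key, sep): sep.join of the truthy values of key over registros
def pvJoined (registros : List (List (String × String))) (k : String) (sep : String) : String :=
  PySem.Str.join sep (registros.filterMap (pvBPick k))

def resumen_personas_alt (registros : List (List (String × String))) (nombre_key : String) (cargo_key : String) (depto_key : Option String) (apoyo_key : Option String) : List (String × String) :=
  [("nombres", pvJoined registros nombre_key ", "),
   ("cargos", pvJoined registros cargo_key ", "),
   ("deptos", match depto_key with
      | some k => if k ≠ "" then pvJoined registros k ", " else ""
      | none => ""),
   ("apoyos", match apoyo_key with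
      | some k => if k ≠ "" then pvJoined registros k "\n" else ""
      | none => "")]

-- ===== PRECONDITION & SPEC =====
def Spec_resumen_personas (registros : List (List (String × String))) (nombre_key : String) (cargo_key : String) (depto_key : Option String) (apoyo_key : Option String) (out : List (String × String)) : Prop := out = resumen_personas_alt registros nombre_key cargo_key depto_key apoyo_key
instance (registros : List (List (String × String))) (nombre_key : String) (cargo_key : String) (depto_key : Option String) (apoyo_key : Option String) (out : List (String × String)) : Decidable (Spec_resumen_personas registros nombre_key cargo_key depto_key apoyo_key out) := by unfold Spec_resumen_personas; infer_instance

-- ===== CLAIM (what is proved, stated in full; the proofs are below) =====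
def Claim_equal_resumen_personas : Prop := ∀ (registros : List (List (String × String))) (nombre_key : String) (cargo_key : String) (depto_key : Option String) (apoyo_key : Option String), Dom_resumen_personas registros nombre_key cargo_key depto_key apoyo_key → Spec_resumen_personas registros nombre_key cargo_key depto_key apoyo_key (resumen_personas registros nombre_key cargo_key depto_key apoyo_key)

-- ===== LEMMAS AND PROOFS =====

-- B's per-record pick, phrased the way A's guard-and-append sees it
theorem pvBPick_eq (k : String) (r : List (String × String)) :
    pvBPick k r = if ((pvGetStr r k).getD "") ≠ "" then some (pvAVal r k) else none := by
  unfold pvBPick pvAVal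
  cases h : pvGetStr r k with
  | none => simp
  | some v => by_cases hv : v = "" <;> simp [hv]

-- loop invariant: A's fold appends exactly B's four filterMaps to the accumulators
theorem pvFold_inv (nk ck : String) (dk ak : Option String) :
    ∀ (regs : List (List (String × String))) (ns cs ds asv : List String),
    regs.foldl (pvAStep nk ck dk ak) (ns, cs, ds, asv) =
      (ns ++ regs.filterMap (pvBPick nk),
       cs ++ regs.filterMap (pvBPick ck),
       ds ++ (match dk with
              | some k => if k ≠ "" then regs.filterMap (pvBPick k) else []
              | none => []),
       asv ++ (match ak with
              | some k => if k ≠ "" then regs.filterMap (pvBPick k) else []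
              | none => [])) := by
  intro regs
  induction regs with
  | nil =>
    intro ns cs ds asv
    cases dk <;> cases ak <;> simp
  | cons r rest ih =>
    intro ns cs ds asv
    simp only [List.foldl_cons, pvAStep, ih]
    refine Prod.ext ?_ (Prod.ext ?_ (Prod.ext ?_ ?_)) <;> simp only []
    · rw [List.filterMap_cons, pvBPick_eq nk r]
      by_cases h : ((pvGetStr r nk).getD "") ≠ "" <;> simp [h]
    · rw [List.filterMap_cons, pvBPick_eq ck r]
      by_cases h : ((pvGetStr r ck).getD "") ≠ "" <;> simp [h]
    · cases dk with
      | none => rfl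
      | some k =>
        simp only []
        by_cases hk : k = ""
        · simp [hk]
        · rw [List.filterMap_cons, pvBPick_eq k r]
          by_cases h : ((pvGetStr r k).getD "") ≠ "" <;> simp [hk, h]
    · cases ak with
      | none => rfl
      | some k =>
        simp only []
        by_cases hk : k = ""
        · simp [hk]
        · rw [List.filterMap_cons, pvBPick_eq k r]
          by_cases h : ((pvGetStr r k).getD "") ≠ "" <;> simp [hk, h]

-- ===== VERDICT (by name: the statement is the Claim_ definition above) =====
theorem resumen_personas_spec : Claim_equal_resumen_personas := by
  intro registros nk ck dk ak _
  unfold Spec_resumen_personas resumen_personas resumen_personas_alt pvJoined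
  rw [pvFold_inv]
  cases dk <;> cases ak <;>
    simp only [List.nil_append, apply_ite (PySem.Str.join ", "), apply_ite (PySem.Str.join "\n")] <;>
    simp [PySem.Str.join]
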